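-- pv_equiv track=rewrite | github.com/RazvanBugoi/bmad-assist | src/bmad_assist/context/parsers/javascript.py | _find_opening_brace
-- ===== SOURCE A (Python) =====
-- from enum import Enum, auto
--
-- class _State(Enum):
--     """Parser state for brace counting."""
--
--     CODE = auto()
--     STRING_SINGLE = auto()
--     STRING_DOUBLE = auto()
--     TEMPLATE = auto()
--     TEMPLATE_EXPR = auto()
--     LINE_COMMENT = auto()
--     BLOCK_COMMENT = auto()
--
-- def _find_opening_brace(content: str, start: int) -> int | None:
--     """Find the first structural opening brace after start position.
--
--     Skips over type annotations, arrow tokens, whitespace, strings,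
--     and comments.
--
--     Args:
--         content: Source code.
--         start: Position to start searching from.
--
--     Returns:
--         Position of opening brace, or None if not found within 500 chars.
--
--     """
--     limit = min(start + 500, len(content))
--     state = _State.CODE
--     skip_next = False
--
--     for i in range(start, limit):
--         if skip_next:
--             skip_next = False
--             continue
--
--         ch = content[i]
--
--         if state == _State.CODE:
--             if ch == "{":
--                 return i
--             if (ch == ";" or ch == "\n") and i > start + 100:
--                 # Likely an arrow without braces
--                 return None
--             if ch == "/" and i + 1 < limit:
--                 if content[i + 1] == "/":
--                     state = _State.LINE_COMMENT
--                     continue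
--                 if content[i + 1] == "*":
--                     state = _State.BLOCK_COMMENT
--                     continue
--             if ch == "'":
--                 state = _State.STRING_SINGLE
--             elif ch == '"':
--                 state = _State.STRING_DOUBLE
--             elif ch == "`":
--                 state = _State.TEMPLATE
--
--         elif state == _State.STRING_SINGLE:
--             if ch == "\\":
--                 skip_next = True
--             elif ch == "'":
--                 state = _State.CODE
--
--         elif state == _State.STRING_DOUBLE:
--             if ch == "\\":
--                 skip_next = True
--             elif ch == '"':
--                 state = _State.CODE
--
--         elif state == _State.TEMPLATE:
--             if ch == "\\":
--                 skip_next = True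
--             elif ch == "`":
--                 state = _State.CODE
--
--         elif state == _State.LINE_COMMENT:
--             if ch == "\n":
--                 state = _State.CODE
--
--         elif state == _State.BLOCK_COMMENT:
--             if ch == "*" and i + 1 < limit and content[i + 1] == "/":
--                 state = _State.CODE
--                 skip_next = True  # Skip the '/'
--
--     return None
-- ===== SOURCE B (Python) =====
-- def _find_opening_brace(content: str, start: int) -> int | None:
--     """Find the first structural opening brace after start position.
--
--     Explicit-index scanner: the outer while-loop walks code characters;
--     strings and comments are consumed whole by small inner loops, so no
--     parser-state enum or skip flag is needed.
--     """
--     limit = min(start + 500, len(content))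
--     i = start
--     while i < limit:
--         ch = content[i]
--         if ch == "{":
--             return i
--         if (ch == ";" or ch == "\n") and i > start + 100:
--             # Likely an arrow without braces
--             return None
--         if ch == "/" and i + 1 < limit and content[i + 1] == "/":
--             # line comment: consume up to and including the newline
--             i += 2
--             while i < limit and content[i] != "\n":
--                 i += 1
--             if i >= limit:
--                 return None
--             i += 1
--             continue
--         if ch == "/" and i + 1 < limit and content[i + 1] == "*":
--             # block comment: consume up to and including '*/'
--             i += 1
--             while True:
--                 if i >= limit:
--                     return None
--                 if content[i] == "*" and i + 1 < limit and content[i + 1] == "/":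
--                     i += 2
--                     break
--                 i += 1
--             continue
--         if ch == "'" or ch == '"' or ch == "`":
--             # string literal: consume up to and including the closing quote
--             quote = ch
--             i += 1
--             while True:
--                 if i >= limit:
--                     return None
--                 c = content[i]
--                 if c == "\\":
--                     i += 2
--                 elif c == quote:
--                     i += 1
--                     break
--                 else:
--                     i += 1
--             continue
--         i += 1
--     return None
-- ===== Notes on version B (the rewrite author's own statement) =====
-- stated objective: simpler
-- what changed: Replaces the enum-state-machine for-loop with a skip_next flag by an explicit-index while scanner that consumes each string/comment span whole with a small inner loop, so no parser-state enum or skip flag exists.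
import Mathlib
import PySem

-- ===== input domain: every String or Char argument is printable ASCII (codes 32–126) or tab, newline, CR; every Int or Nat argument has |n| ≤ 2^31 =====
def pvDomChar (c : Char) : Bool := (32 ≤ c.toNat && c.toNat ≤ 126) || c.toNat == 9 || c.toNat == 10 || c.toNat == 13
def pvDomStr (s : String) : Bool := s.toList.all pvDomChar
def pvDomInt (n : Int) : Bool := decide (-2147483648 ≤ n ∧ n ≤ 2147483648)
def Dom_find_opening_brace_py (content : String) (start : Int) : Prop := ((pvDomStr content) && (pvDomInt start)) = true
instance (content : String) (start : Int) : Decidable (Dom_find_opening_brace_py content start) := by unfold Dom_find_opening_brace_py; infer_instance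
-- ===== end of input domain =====

-- B replaces A's enum-state-machine loop (with skip_next flag) by an explicit-index scanner
-- whose inner loops consume whole string/comment spans; objective: simpler (same single pass).

-- ===== PORT A =====
-- Python's `_State` enum (TEMPLATE_EXPR is declared but never entered, kept for faithfulness).
inductive JsState
  | code | stringSingle | stringDouble | template | templateExpr | lineComment | blockComment
deriving DecidableEq, Repr

-- the `for i in range(start, limit)` loop of A, carrying (state, skip_next);
-- `none` on an out-of-range index = Python's IndexError (excluded by Pre_).
def loopA (content : String) (startp limit : Int) :
    List Int → JsState → Bool → Option Int
  | [], _, _ => none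
  | i :: rest, st, skip =>
    if skip then loopA content startp limit rest st false
    else
      match PySem.Str.pyGet? content i with
      | none => none  -- IndexError
      | some ch =>
        match st with
        | .code =>
          if ch = '{' then some i
          else if (ch = ';' ∨ ch = '\n') ∧ startp + 100 < i then none
          else if ch = '/' ∧ i + 1 < limit ∧ PySem.Str.pyGet? content (i + 1) = some '/' then
            loopA content startp limit rest .lineComment false
          else if ch = '/' ∧ i + 1 < limit ∧ PySem.Str.pyGet? content (i + 1) = some '*' then
            loopA content startp limit rest .blockComment false
          else if ch = '\'' then loopA content startp limit rest .stringSingle false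
          else if ch = '"' then loopA content startp limit rest .stringDouble false
          else if ch = '`' then loopA content startp limit rest .template false
          else loopA content startp limit rest .code false
        | .stringSingle =>
          if ch = '\\' then loopA content startp limit rest .stringSingle true
          else if ch = '\'' then loopA content startp limit rest .code false
          else loopA content startp limit rest .stringSingle false
        | .stringDouble =>
          if ch = '\\' then loopA content startp limit rest .stringDouble true
          else if ch = '"' then loopA content startp limit rest .code false
          else loopA content startp limit rest .stringDouble false
        | .template =>
          if ch = '\\' then loopA content startp limit rest .template true
          else if ch = '`' then loopA content startp limit rest .code false
          else loopA content startp limit rest .template false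
        | .templateExpr => loopA content startp limit rest .templateExpr false  -- no transition in Python either
        | .lineComment =>
          if ch = '\n' then loopA content startp limit rest .code false
          else loopA content startp limit rest .lineComment false
        | .blockComment =>
          if ch = '*' ∧ i + 1 < limit ∧ PySem.Str.pyGet? content (i + 1) = some '/' then
            loopA content startp limit rest .code true  -- skip the '/'
          else loopA content startp limit rest .blockComment false

def find_opening_brace_py (content : String) (start : Int) : Option Int :=
  let limit := min (start + 500) (PySem.Str.len content)
  loopA content start limit (PySem.List.pyRange start limit 1) .code false

-- ===== PORT B =====
-- B's `while i < limit` scanner: bScan is the outer loop; bStr/bLine/bBlock are the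
-- inner loops consuming a string literal / line comment / block comment span.
-- The Nat fuel only makes the recursion structural; it is chosen ≥ limit - start,
-- so it never runs out before `i < limit` fails (proved in the lemmas below).
mutual
def bScan (content : String) (startp limit : Int) : Nat → Int → Option Int
  | 0, _ => none
  | fuel + 1, i =>
    if i < limit then
      match PySem.Str.pyGet? content i with
      | none => none  -- IndexError
      | some ch =>
        if ch = '{' then some i
        else if (ch = ';' ∨ ch = '\n') ∧ startp + 100 < i then none
        else if ch = '/' ∧ i + 1 < limit ∧ PySem.Str.pyGet? content (i + 1) = some '/' then
          bLine content startp limit fuel (i + 2)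
        else if ch = '/' ∧ i + 1 < limit ∧ PySem.Str.pyGet? content (i + 1) = some '*' then
          bBlock content startp limit fuel (i + 1)
        else if ch = '\'' ∨ ch = '"' ∨ ch = '`' then
          bStr content startp limit ch fuel (i + 1)
        else bScan content startp limit fuel (i + 1)
    else none

def bLine (content : String) (startp limit : Int) : Nat → Int → Option Int
  | 0, _ => none
  | fuel + 1, i =>
    if i < limit then
      match PySem.Str.pyGet? content i with
      | none => none  -- IndexError
      | some c =>
        if c = '\n' then bScan content startp limit fuel (i + 1)
        else bLine content startp limit fuel (i + 1)
    else none

def bBlock (content : String) (startp limit : Int) : Nat → Int → Option Int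
  | 0, _ => none
  | fuel + 1, i =>
    if i < limit then
      match PySem.Str.pyGet? content i with
      | none => none  -- IndexError
      | some c =>
        if c = '*' ∧ i + 1 < limit ∧ PySem.Str.pyGet? content (i + 1) = some '/' then
          bScan content startp limit fuel (i + 2)
        else bBlock content startp limit fuel (i + 1)
    else none

def bStr (content : String) (startp limit : Int) (quote : Char) : Nat → Int → Option Int
  | 0, _ => none
  | fuel + 1, i =>
    if i < limit then
      match PySem.Str.pyGet? content i with
      | none => none  -- IndexError
      | some c =>
        if c = '\\' then bStr content startp limit quote fuel (i + 2)
        else if c = quote then bScan content startp limit fuel (i + 1)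
        else bStr content startp limit quote fuel (i + 1)
    else none
end

def find_opening_brace_py_alt (content : String) (start : Int) : Option Int :=
  let limit := min (start + 500) (PySem.Str.len content)
  bScan content start limit (limit - start).toNat start

-- ===== PRECONDITION & SPEC =====
-- Pre_ excludes exactly the inputs where Python A raises IndexError (start below
-- -len(content), so content[start] is out of range); B's Python raises there too.
def Pre_find_opening_brace_py (content : String) (start : Int) : Prop :=
  -(PySem.Str.len content) ≤ start
instance (content : String) (start : Int) : Decidable (Pre_find_opening_brace_py content start) := by
  unfold Pre_find_opening_brace_py; infer_instance

def pvWitness_find_opening_brace_py : String × Int := ("x = {", 0)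

def Spec_find_opening_brace_py (content : String) (start : Int) (out : Option Int) : Prop := out = find_opening_brace_py_alt content start
instance (content : String) (start : Int) (out : Option Int) : Decidable (Spec_find_opening_brace_py content start out) := by unfold Spec_find_opening_brace_py; infer_instance

-- ===== CLAIM (what is proved, stated in full; the proofs are below) =====
def Claim_equal_find_opening_brace_py : Prop := ∀ (content : String) (start : Int), Dom_find_opening_brace_py content start → Pre_find_opening_brace_py content start → Spec_find_opening_brace_py content start (find_opening_brace_py content start)

-- ===== LEMMAS AND PROOFS =====

theorem pyRange_one_nil {a b : Int} (h : b ≤ a) : PySem.List.pyRange a b 1 = [] := by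
  rw [PySem.List.pyRange_one]
  have : (b - a).toNat = 0 := by omega
  simp [this]

-- A's `skip_next` flag consumes exactly the next index.
theorem loopA_skip (content : String) (startp limit : Int) (st : JsState) (j : Int) :
    loopA content startp limit (PySem.List.pyRange j limit 1) st true
      = loopA content startp limit (PySem.List.pyRange (j + 1) limit 1) st false := by
  by_cases h : j < limit
  · rw [PySem.List.pyRange_one_cons h]
    simp [loopA]
  · rw [pyRange_one_nil (by omega), pyRange_one_nil (by omega)]
    simp [loopA]

-- B's loops stop (with any fuel) as soon as the position reaches the limit.
theorem bScan_stop (content : String) (startp limit : Int) (fuel : Nat) (i : Int)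
    (h : ¬ i < limit) : bScan content startp limit fuel i = none := by
  cases fuel <;> simp [bScan, h]

theorem bLine_stop (content : String) (startp limit : Int) (fuel : Nat) (i : Int)
    (h : ¬ i < limit) : bLine content startp limit fuel i = none := by
  cases fuel <;> simp [bLine, h]

theorem bBlock_stop (content : String) (startp limit : Int) (fuel : Nat) (i : Int)
    (h : ¬ i < limit) : bBlock content startp limit fuel i = none := by
  cases fuel <;> simp [bBlock, h]

theorem bStr_stop (content : String) (startp limit : Int) (q : Char) (fuel : Nat) (i : Int)
    (h : ¬ i < limit) : bStr content startp limit q fuel i = none := by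
  cases fuel <;> simp [bStr, h]

-- The simultaneous invariant: from any position i ≥ start, A's state machine in each
-- state computes the same value as the corresponding loop of B (with sufficient fuel).
theorem main_invariant (content : String) (startp limit : Int)
    (Hc : ∀ j : Int, startp ≤ j → j < limit → (PySem.Str.pyGet? content j).isSome) :
    ∀ n : Nat, ∀ (fuel : Nat) (i : Int), startp ≤ i → (limit - i).toNat ≤ n →
      (limit - i).toNat ≤ fuel →
      (loopA content startp limit (PySem.List.pyRange i limit 1) .code false
         = bScan content startp limit fuel i)
    ∧ (loopA content startp limit (PySem.List.pyRange i limit 1) .stringSingle false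
         = bStr content startp limit '\'' fuel i)
    ∧ (loopA content startp limit (PySem.List.pyRange i limit 1) .stringDouble false
         = bStr content startp limit '"' fuel i)
    ∧ (loopA content startp limit (PySem.List.pyRange i limit 1) .template false
         = bStr content startp limit '`' fuel i)
    ∧ (loopA content startp limit (PySem.List.pyRange i limit 1) .lineComment false
         = bLine content startp limit fuel i)
    ∧ (loopA content startp limit (PySem.List.pyRange i limit 1) .blockComment false
         = bBlock content startp limit fuel i) := by
  intro n
  induction n with
  | zero =>
    intro fuel i hsi hle _hf
    have h' : ¬ i < limit := by omega
    rw [pyRange_one_nil (by omega)]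
    exact ⟨by rw [bScan_stop _ _ _ _ _ h']; simp [loopA],
      by rw [bStr_stop _ _ _ _ _ _ h']; simp [loopA],
      by rw [bStr_stop _ _ _ _ _ _ h']; simp [loopA],
      by rw [bStr_stop _ _ _ _ _ _ h']; simp [loopA],
      by rw [bLine_stop _ _ _ _ _ h']; simp [loopA],
      by rw [bBlock_stop _ _ _ _ _ h']; simp [loopA]⟩
  | succ n ih =>
    intro fuel i hsi hle hf
    by_cases hlt : i < limit
    case neg =>
      rw [pyRange_one_nil (by omega)]
      exact ⟨by rw [bScan_stop _ _ _ _ _ hlt]; simp [loopA],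
        by rw [bStr_stop _ _ _ _ _ _ hlt]; simp [loopA],
        by rw [bStr_stop _ _ _ _ _ _ hlt]; simp [loopA],
        by rw [bStr_stop _ _ _ _ _ _ hlt]; simp [loopA],
        by rw [bLine_stop _ _ _ _ _ hlt]; simp [loopA],
        by rw [bBlock_stop _ _ _ _ _ hlt]; simp [loopA]⟩
    case pos =>
      obtain ⟨g, rfl⟩ : ∃ g, fuel = g + 1 := ⟨fuel - 1, by omega⟩
      obtain ⟨ch, hch⟩ := Option.isSome_iff_exists.mp (Hc i hsi hlt)
      have h12 : i + 1 + 1 = i + 2 := by ring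
      rw [PySem.List.pyRange_one_cons hlt]
      refine ⟨?_, ?_, ?_, ?_, ?_, ?_⟩
      · -- CODE ↔ outer scanner
        rw [bScan, if_pos hlt]
        simp only [loopA, hch]
        by_cases h1 : ch = '{'
        · simp [h1]
        by_cases h2 : (ch = ';' ∨ ch = '\n') ∧ startp + 100 < i
        · simp [h1, h2]
        by_cases h3 : ch = '/' ∧ i + 1 < limit ∧ PySem.List.pyGet? content.toList (i + 1) = some '/'
        · obtain ⟨ha, hb, hc2⟩ := h3
          have e1 : bLine content startp limit (g + 1) (i + 1) = bLine content startp limit g (i + 2) := by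
            rw [bLine, if_pos hb]
            simp [hc2, h12]
          simp [ha, hb, hc2]
          rw [(ih (g + 1) (i + 1) (by omega) (by omega) (by omega)).2.2.2.2.1, e1]
        by_cases h4 : ch = '/' ∧ i + 1 < limit ∧ PySem.List.pyGet? content.toList (i + 1) = some '*'
        · obtain ⟨ha, hb, hc2⟩ := h4
          simp [ha, hb, hc2]
          rw [(ih g (i + 1) (by omega) (by omega) (by omega)).2.2.2.2.2]
        by_cases h5 : ch = '\''
        · simp [h5]
          rw [(ih g (i + 1) (by omega) (by omega) (by omega)).2.1]
        by_cases h6 : ch = '"'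
        · simp [h6]
          rw [(ih g (i + 1) (by omega) (by omega) (by omega)).2.2.1]
        by_cases h7 : ch = '`'
        · simp [h7]
          rw [(ih g (i + 1) (by omega) (by omega) (by omega)).2.2.2.1]
        · simp [h1, h2, h3, h4, h5, h6, h7]
          rw [(ih g (i + 1) (by omega) (by omega) (by omega)).1]
      · -- STRING_SINGLE ↔ bStr '\''
        rw [bStr, if_pos hlt]
        simp only [loopA, hch]
        by_cases c1 : ch = '\\'
        · simp [c1]
          rw [loopA_skip, h12, (ih g (i + 2) (by omega) (by omega) (by omega)).2.1]
        by_cases c2 : ch = '\''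
        · simp [c2]
          rw [(ih g (i + 1) (by omega) (by omega) (by omega)).1]
        · simp [c1, c2]
          rw [(ih g (i + 1) (by omega) (by omega) (by omega)).2.1]
      · -- STRING_DOUBLE ↔ bStr '"'
        rw [bStr, if_pos hlt]
        simp only [loopA, hch]
        by_cases c1 : ch = '\\'
        · simp [c1]
          rw [loopA_skip, h12, (ih g (i + 2) (by omega) (by omega) (by omega)).2.2.1]
        by_cases c2 : ch = '"'
        · simp [c2]
          rw [(ih g (i + 1) (by omega) (by omega) (by omega)).1]
        · simp [c1, c2]
          rw [(ih g (i + 1) (by omega) (by omega) (by omega)).2.2.1]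
      · -- TEMPLATE ↔ bStr '`'
        rw [bStr, if_pos hlt]
        simp only [loopA, hch]
        by_cases c1 : ch = '\\'
        · simp [c1]
          rw [loopA_skip, h12, (ih g (i + 2) (by omega) (by omega) (by omega)).2.2.2.1]
        by_cases c2 : ch = '`'
        · simp [c2]
          rw [(ih g (i + 1) (by omega) (by omega) (by omega)).1]
        · simp [c1, c2]
          rw [(ih g (i + 1) (by omega) (by omega) (by omega)).2.2.2.1]
      · -- LINE_COMMENT ↔ bLine
        rw [bLine, if_pos hlt]
        simp only [loopA, hch]
        by_cases c1 : ch = '\n'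
        · simp [c1]
          rw [(ih g (i + 1) (by omega) (by omega) (by omega)).1]
        · simp [c1]
          rw [(ih g (i + 1) (by omega) (by omega) (by omega)).2.2.2.2.1]
      · -- BLOCK_COMMENT ↔ bBlock
        rw [bBlock, if_pos hlt]
        simp only [loopA, hch]
        by_cases c1 : ch = '*' ∧ i + 1 < limit ∧ PySem.List.pyGet? content.toList (i + 1) = some '/'
        · obtain ⟨ha, hb, hc2⟩ := c1
          simp [ha, hb, hc2]
          rw [loopA_skip, h12, (ih g (i + 2) (by omega) (by omega) (by omega)).1]
        · simp [c1]
          rw [(ih g (i + 1) (by omega) (by omega) (by omega)).2.2.2.2.2]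

-- ===== VERDICT (by name: the statement is the Claim_ definition above) =====
theorem find_opening_brace_py_spec : Claim_equal_find_opening_brace_py := by
  intro content start _hdom hpre
  unfold Spec_find_opening_brace_py find_opening_brace_py find_opening_brace_py_alt
  have Hc : ∀ j : Int, start ≤ j → j < min (start + 500) (PySem.Str.len content) →
      (PySem.Str.pyGet? content j).isSome := by
    intro j hj1 hj2
    have hlen : PySem.Str.len content = (content.toList.length : Int) := by
      simp [PySem.Str.len_eq]
    have hpre' : -(content.toList.length : Int) ≤ start := by
      unfold Pre_find_opening_brace_py at hpre; omega
    cases hg : PySem.Str.pyGet? content j with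
    | some c => rfl
    | none =>
      exfalso
      have := (PySem.List.pyGet?_eq_none_iff (xs := content.toList) (i := j)).mp (by
        simpa using hg)
      have hr : PySem.Raise.InRange content.toList.length j := by
        constructor <;> omega
      exact this hr
  exact (main_invariant content start (min (start + 500) (PySem.Str.len content)) Hc
    ((min (start + 500) (PySem.Str.len content)) - start).toNat
    ((min (start + 500) (PySem.Str.len content)) - start).toNat start le_rfl le_rfl le_rfl).1
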